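-- pv_equiv track=rewrite | github.com/carpenn/haute | src/haute/_parser_helpers.py | _strip_docstring
-- ===== SOURCE A (Python) =====
-- def _strip_docstring(lines: list[str]) -> list[str]:
--     """Remove the leading docstring from function body lines."""
--     cleaned: list[str] = []
--     in_docstring = False
--     docstring_done = False
--
--     for line in lines:
--         stripped = line.strip()
--
--         if not docstring_done:
--             if in_docstring:
--                 if '"""' in stripped or "'''" in stripped:
--                     in_docstring = False
--                     docstring_done = True
--                 continue
--             if not cleaned and (stripped.startswith('"""') or stripped.startswith("'''")):
--                 quote = stripped[:3]
--                 if stripped.count(quote) >= 2 and stripped.endswith(quote):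
--                     docstring_done = True
--                     continue
--                 else:
--                     in_docstring = True
--                     continue
--             docstring_done = True
--
--         cleaned.append(line)
--
--     return cleaned
-- ===== SOURCE B (Python) =====
-- def _strip_docstring(lines: list[str]) -> list[str]:
--     """Remove the leading docstring from function body lines."""
--     if not lines:
--         return []
--     first = lines[0].strip()
--     if not (first.startswith('"""') or first.startswith("'''")):
--         return list(lines)
--     quote = first[:3]
--     if first.count(quote) >= 2 and first.endswith(quote):
--         return lines[1:]
--     for i in range(1, len(lines)):
--         s = lines[i].strip()
--         if '"""' in s or "'''" in s:
--             return lines[i + 1:]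
--     return []
-- ===== Notes on version B (the rewrite author's own statement) =====
-- stated objective: simpler
-- what changed: Replaces the per-line state machine (cleaned accumulator plus in_docstring/docstring_done flags) with a direct decomposition: inspect only the first line, then either return the list, slice off the one-line docstring, or find the closing-quote index and return the suffix after it.
import Mathlib
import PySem

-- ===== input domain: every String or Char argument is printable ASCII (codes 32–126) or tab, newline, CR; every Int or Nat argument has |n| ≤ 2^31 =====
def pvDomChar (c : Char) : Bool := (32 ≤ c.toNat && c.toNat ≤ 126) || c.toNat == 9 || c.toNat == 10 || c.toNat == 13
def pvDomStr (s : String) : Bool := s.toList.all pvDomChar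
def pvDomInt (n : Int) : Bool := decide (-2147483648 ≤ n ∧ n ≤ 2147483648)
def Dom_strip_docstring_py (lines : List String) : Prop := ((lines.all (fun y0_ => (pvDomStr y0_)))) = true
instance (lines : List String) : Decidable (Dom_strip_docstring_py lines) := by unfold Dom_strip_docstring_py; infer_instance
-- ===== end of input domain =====

-- B replaces A's flag state machine by a first-line case split and a suffix-after-closing-line scan (objective: simpler).

-- ===== PORT A =====
-- literal transliteration of A's for-loop as structural recursion over the same state
def stripA_loop : List String → List String → Bool → Bool → List String
  | [], cleaned, _, _ => cleaned
  | line :: rest, cleaned, in_doc, done =>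
    let stripped := PySem.Str.strip line
    if !done then
      if in_doc then
        if PySem.Str.isIn "\"\"\"" stripped || PySem.Str.isIn "'''" stripped then
          stripA_loop rest cleaned false true
        else
          stripA_loop rest cleaned in_doc done
      else if cleaned.isEmpty && (PySem.Str.startswith stripped "\"\"\"" || PySem.Str.startswith stripped "'''") then
        let quote := PySem.Str.slice stripped none (some 3)
        if 2 ≤ PySem.Str.count stripped quote && PySem.Str.endswith stripped quote then
          stripA_loop rest cleaned in_doc true
        else
          stripA_loop rest cleaned true done
      else
        stripA_loop rest (cleaned ++ [line]) in_doc true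
    else
      stripA_loop rest (cleaned ++ [line]) in_doc done

def strip_docstring_py (lines : List String) : List String :=
  stripA_loop lines [] false false

-- ===== PORT B =====
-- scan for the first line whose stripped form contains a triple quote; return the suffix after it
def stripB_scan : List String → List String
  | [] => []
  | l :: ls =>
    let s := PySem.Str.strip l
    if PySem.Str.isIn "\"\"\"" s || PySem.Str.isIn "'''" s then ls
    else stripB_scan ls

def strip_docstring_py_alt (lines : List String) : List String :=
  match lines with
  | [] => []
  | first :: rest =>
    let s := PySem.Str.strip first
    if !(PySem.Str.startswith s "\"\"\"" || PySem.Str.startswith s "'''") then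
      first :: rest
    else
      let quote := PySem.Str.slice s none (some 3)
      if 2 ≤ PySem.Str.count s quote && PySem.Str.endswith s quote then rest
      else stripB_scan rest

-- ===== PRECONDITION & SPEC =====
def Spec_strip_docstring_py (lines : List String) (out : List String) : Prop := out = strip_docstring_py_alt lines
instance (lines : List String) (out : List String) : Decidable (Spec_strip_docstring_py lines out) := by unfold Spec_strip_docstring_py; infer_instance

-- ===== CLAIM (what is proved, stated in full; the proofs are below) =====
def Claim_equal_strip_docstring_py : Prop := ∀ (lines : List String), Dom_strip_docstring_py lines → Spec_strip_docstring_py lines (strip_docstring_py lines)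

-- ===== LEMMAS AND PROOFS =====
-- once docstring_done is true, A appends every remaining line
theorem stripA_loop_done (rest : List String) : ∀ (cleaned : List String) (in_doc : Bool),
    stripA_loop rest cleaned in_doc true = cleaned ++ rest := by
  induction rest with
  | nil => intro cleaned in_doc; simp [stripA_loop]
  | cons l ls ih =>
    intro cleaned in_doc
    simp [stripA_loop, ih]

-- inside a docstring, A skips lines until the closing one, ending as cleaned ++ suffix-after
theorem stripA_loop_inDoc (rest : List String) : ∀ (cleaned : List String),
    stripA_loop rest cleaned true false = cleaned ++ stripB_scan rest := by
  induction rest with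
  | nil => intro cleaned; simp [stripA_loop, stripB_scan]
  | cons l ls ih =>
    intro cleaned
    simp only [stripA_loop, stripB_scan, Bool.not_false, eq_self_iff_true, if_true, Bool.or_eq_true]
    split_ifs with h
    · simp [stripA_loop_done]
    · simp [ih]

-- ===== VERDICT (by name: the statement is the Claim_ definition above) =====
theorem strip_docstring_py_spec : Claim_equal_strip_docstring_py := by
  intro lines _
  unfold Spec_strip_docstring_py strip_docstring_py strip_docstring_py_alt
  match lines with
  | [] => rfl
  | first :: rest =>
    simp only [stripA_loop, List.isEmpty_nil, Bool.true_and]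
    simp only [Bool.not_eq_eq_eq_not, Bool.not_true, Bool.or_eq_false_iff, Bool.or_eq_true,
      Bool.and_eq_true, decide_eq_true_eq]
    split_ifs with h1 h2 h3 h4 h5 h6 <;>
      simp_all [stripA_loop_done, stripA_loop_inDoc, PySem.Str.startswith, PySem.Str.count,
        PySem.Str.endswith, PySem.Str.slice, PySem.Str.strip]
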